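-- pv_equiv track=rewrite | github.com/piotrhelm/NESTFUL | data_v2/executable_functions/py_code_file_2145.py | get_substrings_after_api
-- ===== SOURCE A (Python) =====
-- from typing import List
--
-- def get_substrings_after_api(file_path: str) -> List[str]:
--
--     """Returns a list of all the file substrings that appear in the file path after the last occurrence of the word 'api'.
--
--
--
--     Args:
--
--         file_path: The file path to extract the substrings from.
--
--
--
--     Returns:
--
--         A list of file substrings that appear after the last occurrence of the word 'api' in the file path.
--
--     """
--
--     parts = file_path.split('/')
--
--     last_api_index = -1
--
--     for i, part in enumerate(parts):
--
--         if part == 'api':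
--
--             last_api_index = i
--
--     substrings_after_api = parts[last_api_index + 1:]
--
--     return substrings_after_api
-- ===== SOURCE B (Python) =====
-- def get_substrings_after_api(file_path: str):
--     buf = []
--     for seg in reversed(file_path.split('/')):
--         if seg == 'api':
--             break
--         buf.append(seg)
--     return buf[::-1]
-- ===== Notes on version B (the rewrite author's own statement) =====
-- stated objective: alternative
-- what changed: Instead of a forward scan tracking the sentinel segment's last index followed by a slice, B walks the segments from the end accumulating a suffix buffer and stops at the first sentinel segment seen from the end.
import Mathlib
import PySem

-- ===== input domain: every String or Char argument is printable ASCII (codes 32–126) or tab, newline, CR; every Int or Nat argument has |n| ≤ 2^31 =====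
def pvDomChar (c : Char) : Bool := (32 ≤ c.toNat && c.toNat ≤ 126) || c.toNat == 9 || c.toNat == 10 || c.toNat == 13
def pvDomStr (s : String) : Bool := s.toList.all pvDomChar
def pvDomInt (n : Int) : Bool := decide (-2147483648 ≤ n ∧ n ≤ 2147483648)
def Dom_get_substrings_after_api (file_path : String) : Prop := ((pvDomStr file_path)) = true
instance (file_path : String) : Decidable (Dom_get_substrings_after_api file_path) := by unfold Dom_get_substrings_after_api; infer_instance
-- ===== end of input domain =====

-- B changes the decomposition: a reverse walk with an accumulator and early stop, instead of A's
-- forward last-index scan followed by a slice; same cost, equivalence proved below.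

-- ===== PORT A =====
-- forward scan over enumerate(parts) keeping the last index where the part equals "api", then slice
def get_substrings_after_api (file_path : String) : List String :=
  let parts := (PySem.Str.split? file_path "/").getD []
  let last_api_index : Int :=
    (PySem.List.enumerate parts 0).foldl
      (fun acc p => if p.2 = "api" then p.1 else acc) (-1)
  PySem.List.slice parts (some (last_api_index + 1)) none

-- ===== PORT B =====
-- reverse walk, appending each segment to a buffer, stopping at the first "api" seen from the end
def bGo : List String → List String → List String
  | [], buf => buf
  | seg :: rest, buf => if seg = "api" then buf else bGo rest (buf ++ [seg])

def get_substrings_after_api_alt (file_path : String) : List String :=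
  (bGo ((PySem.Str.split? file_path "/").getD []).reverse []).reverse

-- ===== PRECONDITION & SPEC =====
def Spec_get_substrings_after_api (file_path : String) (out : List String) : Prop := out = get_substrings_after_api_alt file_path
instance (file_path : String) (out : List String) : Decidable (Spec_get_substrings_after_api file_path out) := by unfold Spec_get_substrings_after_api; infer_instance

-- ===== CLAIM (what is proved, stated in full; the proofs are below) =====
def Claim_equal_get_substrings_after_api : Prop := ∀ (file_path : String), Dom_get_substrings_after_api file_path → Spec_get_substrings_after_api file_path (get_substrings_after_api file_path)

-- ===== LEMMAS AND PROOFS =====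

-- A's loop value, as a function of the split parts
def lastIdx (parts : List String) : Int :=
  (PySem.List.enumerate parts 0).foldl
    (fun acc p => if p.2 = "api" then p.1 else acc) (-1)

theorem lastIdx_append (l : List String) (a : String) :
    lastIdx (l ++ [a]) = if a = "api" then (l.length : Int) else lastIdx l := by
  simp [lastIdx, PySem.List.enumerate_append, PySem.List.enumerate_cons, PySem.List.enumerate_nil]

theorem lastIdx_bounds (l : List String) : -1 ≤ lastIdx l ∧ lastIdx l < l.length := by
  induction l using List.reverseRecOn with
  | nil => simp [lastIdx, PySem.List.enumerate_nil]
  | append_singleton l a ih =>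
      rw [lastIdx_append]
      simp only [List.length_append, List.length_singleton]
      split_ifs <;> constructor <;> push_cast <;> omega

theorem bGo_buf (l b : List String) : bGo l b = b ++ bGo l [] := by
  induction l generalizing b with
  | nil => simp [bGo]
  | cons x xs ih =>
      simp only [bGo]
      split_ifs with h
      · simp
      · rw [ih (b ++ [x]), ih ([] ++ [x])]; simp

theorem main_lemma (parts : List String) :
    PySem.List.slice parts (some (lastIdx parts + 1)) none = (bGo parts.reverse []).reverse := by
  induction parts using List.reverseRecOn with
  | nil => simp [lastIdx, PySem.List.enumerate_nil, PySem.List.slice, bGo]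
  | append_singleton l a ih =>
      rw [lastIdx_append]
      by_cases h : a = "api"
      · subst h
        rw [if_pos rfl, PySem.List.slice_from _ (by omega)]
        have h1 : ((l.length : Int) + 1).toNat = l.length + 1 := by omega
        rw [h1]
        simp [bGo]
      · rw [if_neg h]
        have hb := lastIdx_bounds l
        rw [PySem.List.slice_from _ (by omega)]
        rw [PySem.List.slice_from _ (by omega)] at ih
        have hle : (lastIdx l + 1).toNat ≤ l.length := by omega
        rw [List.drop_append_of_le_length hle, ih]
        simp only [List.reverse_append, List.reverse_singleton, List.singleton_append, bGo,
          if_neg h]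
        rw [bGo_buf l.reverse ([] ++ [a])]
        simp

-- ===== VERDICT (by name: the statement is the Claim_ definition above) =====
theorem get_substrings_after_api_spec : Claim_equal_get_substrings_after_api := by
  intro fp _
  unfold Spec_get_substrings_after_api get_substrings_after_api get_substrings_after_api_alt
  exact main_lemma ((PySem.Str.split? fp "/").getD [])
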